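-- pv_equiv track=rewrite | github.com/namdang-exe/leetcode_challenge | MatrixTransposeMult.py | cons_mat
-- ===== SOURCE A (Python) =====
-- def cons_mat(s, m, n):
--     # construct matrix
--     # [[4, 5], [6, 7], [8, 9]]
--     mat = []
--     for i in range(m):
--         temp = []
--         for j in range(n):
--             temp += [s]
--             s += 1
--         mat.append(temp)
--     return mat
-- ===== SOURCE B (Python) =====
-- def cons_mat(s, m, n):
--     # Generate the flat value sequence once, then slice it into m rows of n.
--     flat = range(s, s + m * n)
--     return [list(flat[i * n:(i + 1) * n]) for i in range(m)]
-- ===== Notes on version B (the rewrite author's own statement) =====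
-- stated objective: idiomatic
-- what changed: Replaces the per-cell accumulator with generating the whole flat value range up front and slicing it into m consecutive n-chunks.
import Mathlib
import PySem

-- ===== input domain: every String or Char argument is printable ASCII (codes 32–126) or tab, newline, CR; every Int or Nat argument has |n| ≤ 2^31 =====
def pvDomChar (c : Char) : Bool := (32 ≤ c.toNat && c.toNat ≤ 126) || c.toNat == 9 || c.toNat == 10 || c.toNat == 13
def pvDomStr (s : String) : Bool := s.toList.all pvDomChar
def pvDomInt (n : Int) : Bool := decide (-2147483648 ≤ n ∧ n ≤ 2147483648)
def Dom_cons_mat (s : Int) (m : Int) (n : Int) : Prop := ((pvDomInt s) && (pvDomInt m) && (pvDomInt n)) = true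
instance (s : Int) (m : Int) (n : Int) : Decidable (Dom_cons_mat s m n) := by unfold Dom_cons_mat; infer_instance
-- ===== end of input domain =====

-- B builds the whole flat value range once and slices it into m rows of n,
-- instead of A's per-cell accumulator loops (objective: idiomatic).

-- ===== PORT A =====
-- for i in range(m): temp = []; for j in range(n): temp += [s]; s += 1; mat.append(temp)
def cons_mat (s : Int) (m : Int) (n : Int) : List (List Int) :=
  ((PySem.List.pyRange 0 m 1).foldl
    (fun (st : List (List Int) × Int) _i =>
      let inner := (PySem.List.pyRange 0 n 1).foldl
        (fun (ts : List Int × Int) _j => (ts.1 ++ [ts.2], ts.2 + 1)) ([], st.2)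
      (st.1 ++ [inner.1], inner.2))
    ([], s)).1

-- ===== PORT B =====
-- flat = list(range(s, s + m * n)); [flat[i*n:(i+1)*n] for i in range(m)]
def cons_mat_alt (s : Int) (m : Int) (n : Int) : List (List Int) :=
  let flat := PySem.List.pyRange s (s + m * n) 1
  (PySem.List.pyRange 0 m 1).map
    (fun i => PySem.List.slice flat (some (i * n)) (some ((i + 1) * n)))

-- ===== PRECONDITION & SPEC =====
def Spec_cons_mat (s : Int) (m : Int) (n : Int) (out : List (List Int)) : Prop := out = cons_mat_alt s m n
instance (s : Int) (m : Int) (n : Int) (out : List (List Int)) : Decidable (Spec_cons_mat s m n out) := by unfold Spec_cons_mat; infer_instance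

-- ===== CLAIM (what is proved, stated in full; the proofs are below) =====
def Claim_equal_cons_mat : Prop := ∀ (s : Int) (m : Int) (n : Int), Dom_cons_mat s m n → Spec_cons_mat s m n (cons_mat s m n)

-- ===== LEMMAS AND PROOFS =====

-- A's rows, written as a direct recursion: k rows, each n.toNat consecutive values.
def rowsA (n : Int) : Int → Nat → List (List Int)
  | _, 0 => []
  | s, k+1 => PySem.List.pyRange s (s + (n.toNat : Int)) 1 :: rowsA n (s + (n.toNat : Int)) k

theorem innerLoop (l : List Int) : ∀ (temp : List Int) (s : Int),
    l.foldl (fun (ts : List Int × Int) _j => (ts.1 ++ [ts.2], ts.2 + 1)) (temp, s)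
      = (temp ++ PySem.List.pyRange s (s + (l.length : Int)) 1, s + (l.length : Int)) := by
  induction l with
  | nil => intro temp s; simp [PySem.List.pyRange_one_eq_nil (le_refl s)]
  | cons hd tl ih =>
    intro temp s
    rw [List.foldl_cons, ih (temp ++ [s]) (s + 1)]
    have hlt : s < s + ((tl.length : Int) + 1) := by
      have : (0 : Int) ≤ (tl.length : Int) := Int.natCast_nonneg _
      omega
    simp only [List.length_cons]
    push_cast
    rw [show s + 1 + (tl.length : Int) = s + ((tl.length : Int) + 1) from by ring,
        PySem.List.pyRange_one_cons hlt]
    simp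

theorem outerLoop (n : Int) (l : List Int) : ∀ (mat : List (List Int)) (s : Int),
    l.foldl
      (fun (st : List (List Int) × Int) _i =>
        let inner := (PySem.List.pyRange 0 n 1).foldl
          (fun (ts : List Int × Int) _j => (ts.1 ++ [ts.2], ts.2 + 1)) ([], st.2)
        (st.1 ++ [inner.1], inner.2))
      (mat, s)
    = (mat ++ rowsA n s l.length, s + (l.length : Int) * (n.toNat : Int)) := by
  induction l with
  | nil => intro mat s; simp [rowsA]
  | cons hd tl ih =>
    intro mat s
    have step :
        (let inner := (PySem.List.pyRange 0 n 1).foldl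
            (fun (ts : List Int × Int) _j => (ts.1 ++ [ts.2], ts.2 + 1)) ([], (mat, s).2)
         ((mat, s).1 ++ [inner.1], inner.2))
        = (mat ++ [PySem.List.pyRange s (s + (n.toNat : Int)) 1], s + (n.toNat : Int)) := by
      simp [innerLoop, PySem.List.length_pyRange_one]
    rw [List.foldl_cons, step, ih]
    simp only [List.length_cons, rowsA]
    push_cast
    rw [Prod.mk.injEq]
    exact ⟨by simp [List.append_assoc], by ring⟩

theorem drop_pyRange_one (j : Nat) : ∀ (a b : Int),
    (PySem.List.pyRange a b 1).drop j = PySem.List.pyRange (a + (j : Int)) b 1 := by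
  induction j with
  | zero => intro a b; simp
  | succ j ih =>
    intro a b
    by_cases h : a < b
    · rw [PySem.List.pyRange_one_cons h, List.drop_succ_cons, ih]
      congr 1
      push_cast; ring
    · rw [PySem.List.pyRange_one_eq_nil (le_of_not_gt h), List.drop_nil,
          PySem.List.pyRange_one_eq_nil (by omega : b ≤ a + ((j + 1 : Nat) : Int))]

theorem take_pyRange_one (j : Nat) : ∀ (a b : Int),
    (PySem.List.pyRange a b 1).take j = PySem.List.pyRange a (min (a + (j : Int)) b) 1 := by
  induction j with
  | zero =>
    intro a b
    rw [List.take_zero]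
    exact (PySem.List.pyRange_one_eq_nil (by simp)).symm
  | succ j ih =>
    intro a b
    by_cases h : a < b
    · rw [PySem.List.pyRange_one_cons h, List.take_succ_cons, ih,
          PySem.List.pyRange_one_cons (lt_min (by omega) h)]
      congr 2
      omega
    · rw [PySem.List.pyRange_one_eq_nil (le_of_not_gt h), List.take_nil,
          PySem.List.pyRange_one_eq_nil (by omega : min (a + ((j + 1 : Nat) : Int)) b ≤ a)]

theorem slice_chunk (s m n : Int) (i : Nat) (hi : i < m.toNat) :
    PySem.List.slice (PySem.List.pyRange s (s + m * n) 1)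
        (some ((i : Int) * n)) (some (((i : Int) + 1) * n))
      = PySem.List.pyRange (s + (i : Int) * (n.toNat : Int))
          (s + (i : Int) * (n.toNat : Int) + (n.toNat : Int)) 1 := by
  have hm : 0 < m := by
    by_contra hc
    have : m.toNat = 0 := Int.toNat_of_nonpos (by omega)
    omega
  by_cases hn : 0 ≤ n
  · have hin : ((i : Int) * n) = ((i * n.toNat : Nat) : Int) := by
      push_cast; rw [Int.toNat_of_nonneg hn]
    have hin2 : (((i : Int) + 1) * n) = (((i + 1) * n.toNat : Nat) : Int) := by
      push_cast; rw [Int.toNat_of_nonneg hn]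
    rw [hin, hin2, PySem.List.slice_natCast, drop_pyRange_one, take_pyRange_one]
    have hsub : (i + 1) * n.toNat - i * n.toNat = n.toNat := by
      have : (i + 1) * n.toNat = i * n.toNat + n.toNat := by ring
      omega
    have hle : s + ((i * n.toNat : Nat) : Int) + (n.toNat : Int) ≤ s + m * n := by
      have h1 : ((i : Int) + 1) * (n.toNat : Int) ≤ (m.toNat : Int) * (n.toNat : Int) :=
        mul_le_mul_of_nonneg_right (by exact_mod_cast hi) (by positivity)
      have h2 : m * n = (m.toNat : Int) * (n.toNat : Int) := by
        rw [Int.toNat_of_nonneg hn, Int.toNat_of_nonneg (le_of_lt hm)]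
      push_cast
      nlinarith
    rw [hsub, min_eq_left hle]
    congr 1
  · have hflat : PySem.List.pyRange s (s + m * n) 1 = [] := by
      have : m * n ≤ 0 := mul_nonpos_of_nonneg_of_nonpos (le_of_lt hm) (by omega)
      exact PySem.List.pyRange_one_eq_nil (by omega)
    have hnn : n.toNat = 0 := Int.toNat_of_nonpos (by omega)
    rw [hflat, hnn]
    simp [PySem.List.slice, PySem.List.pyRange_one_eq_nil (le_refl _)]

theorem rowsA_length (n : Int) (k : Nat) : ∀ s, (rowsA n s k).length = k := by
  induction k with
  | zero => intro s; rfl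
  | succ k ih => intro s; simp [rowsA, ih]

theorem rowsA_get (n : Int) (k : Nat) : ∀ (s : Int) (i : Nat) (h : i < k),
    (rowsA n s k)[i]'(by rw [rowsA_length]; exact h)
      = PySem.List.pyRange (s + (i : Int) * (n.toNat : Int)) (s + (i : Int) * (n.toNat : Int) + (n.toNat : Int)) 1 := by
  induction k with
  | zero => intro s i h; omega
  | succ k ih =>
    intro s i h
    cases i with
    | zero => simp [rowsA]
    | succ i =>
      simp only [rowsA, List.getElem_cons_succ]
      rw [ih (s + (n.toNat : Int)) i (by omega)]
      congr 1 <;> push_cast <;> ring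

-- ===== VERDICT (by name: the statement is the Claim_ definition above) =====
theorem cons_mat_spec : Claim_equal_cons_mat := by
  intro s m n _
  show cons_mat s m n = cons_mat_alt s m n
  have hA : cons_mat s m n = rowsA n s m.toNat := by
    unfold cons_mat
    rw [outerLoop]
    simp [PySem.List.length_pyRange_one]
  rw [hA]
  unfold cons_mat_alt
  rw [PySem.List.pyRange_one 0 m]
  simp only [Int.sub_zero, List.map_map]
  apply List.ext_getElem
  · simp [rowsA_length]
  · intro i h1 h2
    rw [rowsA_get n m.toNat s i (by rwa [rowsA_length] at h1)]
    simp only [List.getElem_map, List.getElem_range, Function.comp_apply, Int.zero_add]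
    exact (slice_chunk s m n i (by simpa [rowsA_length] using h1)).symm
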